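-- pv_equiv track=rewrite | github.com/JohnnyPitchfork/testRepository | Decimal_to_Binary.py | digit_list
-- ===== SOURCE A (Python) =====
-- def calc_no_shooter(number):
--     number = int(number)
--     if number == 0 or number == 1:
--         number = 0
--     elif number == 2 or number == 3:
--         number = 1
--     elif number == 4 or number == 5:
--         number = 2
--     elif number == 6 or number == 7:
--         number = 3
--     elif number == 8 or number == 9:
--         number = 4
--     return number
--
-- def calc_with_shooter(number):
--     number = int(number)
--     if number == 0 or number == 1:
--         number = 5
--     elif number == 2 or number == 3:
--         number = 6
--     elif number == 4 or number == 5: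
--         number = 7
--     elif number == 6 or number == 7:
--         number = 8
--     elif number == 8 or number == 9:
--         number = 9
--     return number
--
-- def digit_list(input_number):
--     input_len = len(str(input_number))
--     input_number = str(input_number)
--     y = 0
--     d_list = ""
--     odd = False
--     for i in range(0,input_len):
--         x = int(input_number[i])
--
--         if odd == False:
--             y=str(calc_no_shooter(int(x)))
--         else:
--             y=str(calc_with_shooter(int(x)))
--         d_list = str(d_list) + str(y)
--
--         if (x % 2) == 0:
--             odd = False
--         else:
--             odd = True
--
--
--     return d_list
-- ===== SOURCE B (Python) =====
-- def digit_list(input_number):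
--     if input_number < 10:
--         return str(input_number // 2)
--     return digit_list(input_number // 10) + str(
--         input_number % 10 // 2 + 5 * (input_number // 10 % 10 % 2))
-- ===== Notes on version B (the rewrite author's own statement) =====
-- stated objective: simpler
-- what changed: Replaces A's left-to-right loop over str(input_number) with a running odd flag and two ten-branch if-elif lookup ladders by a purely arithmetic recursion on the integer itself: divmod digit extraction, the previous digit's parity read off arithmetically from the floor quotient, and the result built back-to-front by recursive string concatenation with no string conversion of the input.
import Mathlib
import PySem

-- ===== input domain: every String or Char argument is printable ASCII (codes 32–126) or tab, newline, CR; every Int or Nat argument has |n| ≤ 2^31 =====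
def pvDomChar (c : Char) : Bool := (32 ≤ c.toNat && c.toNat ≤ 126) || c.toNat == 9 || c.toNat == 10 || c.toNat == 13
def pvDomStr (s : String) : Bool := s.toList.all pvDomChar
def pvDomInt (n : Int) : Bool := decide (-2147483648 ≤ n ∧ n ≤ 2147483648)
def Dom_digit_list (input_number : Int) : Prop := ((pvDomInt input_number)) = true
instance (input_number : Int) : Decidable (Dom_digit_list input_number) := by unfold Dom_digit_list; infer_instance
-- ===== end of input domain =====

-- B replaces A's left-to-right loop over str(input_number) with running odd state and two ten-branch
-- lookup ladders by a purely arithmetic recursion on the integer itself (divmod digit extraction,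
-- result built back-to-front); objective: simpler. A raises ValueError on negative input
-- (int('-')); those inputs are excluded by Pre_.


-- ===== PORT A =====
def calc_no_shooter (number : Int) : Int :=
  if number == 0 || number == 1 then 0
  else if number == 2 || number == 3 then 1
  else if number == 4 || number == 5 then 2
  else if number == 6 || number == 7 then 3
  else if number == 8 || number == 9 then 4
  else number

def calc_with_shooter (number : Int) : Int :=
  if number == 0 || number == 1 then 5
  else if number == 2 || number == 3 then 6
  else if number == 4 || number == 5 then 7
  else if number == 6 || number == 7 then 8
  else if number == 8 || number == 9 then 9
  else number

-- int(s[i]) for the single character s[i]; inside Pre_ the index is in range and the char a digit,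
-- so pyGetD/getD defaults are never hit.
def digit_list (input_number : Int) : String :=
  let s := PySem.Int.toChars input_number
  let input_len : Int := PySem.List.len s
  let st := (PySem.List.pyRange 0 input_len).foldl
    (fun (st : List Char × Bool) i =>
      let x := (PySem.Int.ofChars? [PySem.List.pyGetD s i ' ']).getD 0
      let y := if st.2 == false then PySem.Int.toChars (calc_no_shooter x)
               else PySem.Int.toChars (calc_with_shooter x)
      (st.1 ++ y, if PySem.Int.mod x 2 == 0 then false else true))
    ([], false)
  String.ofList st.1

-- ===== PORT B =====
-- termination: in the else branch the floor quotient by ten shrinks (decreasing_by below)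
def digit_list_alt (input_number : Int) : String :=
  if _h : input_number < 10 then PySem.Int.toStr (PySem.Int.floordiv input_number 2)
  else digit_list_alt (PySem.Int.floordiv input_number 10) ++
       PySem.Int.toStr (PySem.Int.floordiv (PySem.Int.mod input_number 10) 2 +
         5 * PySem.Int.mod (PySem.Int.mod (PySem.Int.floordiv input_number 10) 10) 2)
termination_by input_number.toNat
decreasing_by
  have h10 : PySem.Int.floordiv input_number 10 = input_number / 10 :=
    PySem.Int.floordiv_eq_ediv_of_pos (by norm_num)
  rw [h10]; omega

-- ===== PRECONDITION & SPEC =====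
-- Pre_ excludes negative inputs: there str(input_number) starts with '-' and int('-') raises ValueError in A.
def Pre_digit_list (input_number : Int) : Prop := 0 ≤ input_number
instance (input_number : Int) : Decidable (Pre_digit_list input_number) := by unfold Pre_digit_list; infer_instance
def pvWitness_digit_list : Int := 1234

def Spec_digit_list (input_number : Int) (out : String) : Prop := out = digit_list_alt input_number
instance (input_number : Int) (out : String) : Decidable (Spec_digit_list input_number out) := by unfold Spec_digit_list; infer_instance

-- ===== CLAIM (what is proved, stated in full; the proofs are below) =====
def Claim_equal_digit_list : Prop := ∀ (input_number : Int), Dom_digit_list input_number → Pre_digit_list input_number → Spec_digit_list input_number (digit_list input_number)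

-- ===== LEMMAS AND PROOFS =====

-- A's loop body as a named step function
def pvStep (st : List Char × Bool) (c : Char) : List Char × Bool :=
  let x := (PySem.Int.ofChars? [c]).getD 0
  let y := if st.2 == false then PySem.Int.toChars (calc_no_shooter x)
           else PySem.Int.toChars (calc_with_shooter x)
  (st.1 ++ y, if PySem.Int.mod x 2 == 0 then false else true)

-- the characters A emits for one digit, given the running odd flag
def pvDig (odd : Bool) (d : Nat) : List Char :=
  if odd then PySem.Int.toChars (calc_with_shooter d) else PySem.Int.toChars (calc_no_shooter d)

-- A's whole output (as chars) computed by B's right-to-left recursion shape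
def pvB (odd : Bool) (m : Nat) : List Char :=
  if m < 10 then pvDig odd m
  else pvB odd (m / 10) ++ pvDig (m / 10 % 10 % 2 == 1) (m % 10)
decreasing_by omega

-- Nat.toDigits facts ------------------------------------------------------

lemma pvCore_acc (f : Nat) : ∀ (n : Nat) (l : List Char),
    Nat.toDigitsCore 10 f n l = Nat.toDigitsCore 10 f n [] ++ l := by
  induction f with
  | zero => intro n l; simp [Nat.toDigitsCore]
  | succ f ih =>
    intro n l
    by_cases h : n / 10 = 0
    · simp [Nat.toDigitsCore, h]
    · simp only [Nat.toDigitsCore, h, if_false]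
      rw [ih (n / 10) (Nat.digitChar (n % 10) :: l), ih (n / 10) [Nat.digitChar (n % 10)]]
      simp

lemma pvCore_fuel (n : Nat) : ∀ (f₁ f₂ : Nat), n < f₁ → n < f₂ →
    Nat.toDigitsCore 10 f₁ n [] = Nat.toDigitsCore 10 f₂ n [] := by
  induction n using Nat.strong_induction_on with
  | _ n ih =>
    intro f₁ f₂ h₁ h₂
    obtain ⟨f₁, rfl⟩ : ∃ g, f₁ = g + 1 := ⟨f₁ - 1, by omega⟩
    obtain ⟨f₂, rfl⟩ : ∃ g, f₂ = g + 1 := ⟨f₂ - 1, by omega⟩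
    by_cases h : n / 10 = 0
    · simp [Nat.toDigitsCore, h]
    · have hlt : n / 10 < n := Nat.div_lt_self (by omega) (by norm_num)
      simp only [Nat.toDigitsCore, h, if_false]
      rw [pvCore_acc f₁, pvCore_acc f₂, ih (n / 10) hlt f₁ f₂ (by omega) (by omega)]

lemma pvToDigits_lt (m : Nat) (h : m < 10) : Nat.toDigits 10 m = [Nat.digitChar m] := by
  have h0 : m / 10 = 0 := Nat.div_eq_of_lt h
  simp [Nat.toDigits, Nat.toDigitsCore, h0, Nat.mod_eq_of_lt h]

lemma pvToDigits_split (m : Nat) (h : 10 ≤ m) :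
    Nat.toDigits 10 m = Nat.toDigits 10 (m / 10) ++ [Nat.digitChar (m % 10)] := by
  have h0 : m / 10 ≠ 0 := by
    intro hc; have := Nat.div_eq_of_lt (show m < 10 by omega); omega
  have hlt : m / 10 < m := Nat.div_lt_self (by omega) (by norm_num)
  show Nat.toDigitsCore 10 (m + 1) m [] = _
  simp only [Nat.toDigitsCore, h0, if_false]
  rw [pvCore_acc m, pvCore_fuel (m / 10) m (m / 10 + 1) (by omega) (by omega)]
  rfl

-- one fold step on a digit character --------------------------------------

lemma pvStep_digit (d : Nat) (hd : d < 10) (acc : List Char) (odd : Bool) :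
    pvStep (acc, odd) (Nat.digitChar d) = (acc ++ pvDig odd d, d % 2 == 1) := by
  interval_cases d <;> cases odd <;> simp [pvStep, pvDig] <;> decide

-- A's fold over the decimal digits of m, fully characterised ---------------

lemma pvFold (m : Nat) : ∀ (odd : Bool) (acc : List Char),
    (Nat.toDigits 10 m).foldl pvStep (acc, odd) = (acc ++ pvB odd m, m % 2 == 1) := by
  induction m using Nat.strong_induction_on with
  | _ m ih =>
    intro odd acc
    by_cases h : m < 10
    · rw [pvToDigits_lt m h]
      simp only [List.foldl_cons, List.foldl_nil, pvStep_digit m h acc odd]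
      rw [pvB, if_pos h]
    · have hlt : m / 10 < m := Nat.div_lt_self (by omega) (by norm_num)
      rw [pvToDigits_split m (by omega), List.foldl_append]
      rw [ih (m / 10) hlt odd acc]
      simp only [List.foldl_cons, List.foldl_nil]
      rw [pvStep_digit (m % 10) (Nat.mod_lt _ (by norm_num)) _ _]
      rw [show pvB odd m = pvB odd (m / 10) ++ pvDig (m / 10 % 10 % 2 == 1) (m % 10) from
        by rw [pvB, if_neg h], ← List.append_assoc]
      rw [Nat.mod_mod_of_dvd m (by norm_num : (2:Nat) ∣ 10)]
      rw [Nat.mod_mod_of_dvd (m / 10) (by norm_num : (2:Nat) ∣ 10)]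

-- B's recursion equals pvB on casts of naturals ----------------------------

lemma pvDig_alt (p d : Nat) (hd : d < 10) :
    pvDig (p % 2 == 1) d =
      PySem.Int.toChars (PySem.Int.floordiv (d : Int) 2 + 5 * ((p % 2 : Nat) : Int)) := by
  have h2 : p % 2 < 2 := Nat.mod_lt _ (by norm_num)
  interval_cases hp : p % 2 <;> interval_cases d <;> decide

lemma pvAlt_eq_pvB (m : Nat) : digit_list_alt (m : Int) = String.ofList (pvB false m) := by
  induction m using Nat.strong_induction_on with
  | _ m ih =>
    by_cases h : m < 10
    · rw [digit_list_alt, dif_pos (by exact_mod_cast h)]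
      rw [pvB, if_pos h]
      apply String.toList_injective
      rw [PySem.Int.toList_toStr, String.toList_ofList]
      have hd := pvDig_alt 0 m h
      simp only [Nat.zero_mod, Nat.cast_zero] at hd
      rw [show ((0 : Nat) % 2 == 1) = false from rfl] at hd
      rw [hd]
      congr 1
      ring
    · have hlt : m / 10 < m := Nat.div_lt_self (by omega) (by norm_num)
      rw [digit_list_alt, dif_neg (by exact_mod_cast h)]
      rw [pvB, if_neg h]
      have hdiv : PySem.Int.floordiv (m : Int) 10 = ((m / 10 : Nat) : Int) := by
        exact_mod_cast PySem.Int.floordiv_natCast m 10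
      have hmod : PySem.Int.mod (m : Int) 10 = ((m % 10 : Nat) : Int) := by
        exact_mod_cast PySem.Int.mod_natCast m 10
      have hmod2 : PySem.Int.mod ((m / 10 : Nat) : Int) 10 = ((m / 10 % 10 : Nat) : Int) := by
        exact_mod_cast PySem.Int.mod_natCast (m / 10) 10
      rw [hdiv, hmod, hmod2, ih (m / 10) hlt]
      apply String.toList_injective
      rw [String.toList_append, PySem.Int.toList_toStr, String.toList_ofList, String.toList_ofList]
      congr 1
      have hmm : PySem.Int.mod ((m / 10 % 10 : Nat) : Int) 2 = ((m / 10 % 10 % 2 : Nat) : Int) := by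
        exact_mod_cast PySem.Int.mod_natCast (m / 10 % 10) 2
      rw [hmm, pvDig_alt (m / 10 % 10) (m % 10) (Nat.mod_lt _ (by norm_num))]

-- A on nonnegative n, via the fold characterisation -----------------------

lemma digit_list_eq (n : Int) (hpre : 0 ≤ n) : digit_list n = digit_list_alt n := by
  simp only [digit_list]
  have hs : PySem.Int.toChars n = Nat.toDigits 10 n.toNat := by
    simp [PySem.Int.toChars, not_lt.mpr hpre]
  rw [PySem.List.foldl_pyRange_pyGetD (PySem.Int.toChars n) ' '
      (fun (st : List Char × Bool) c =>
        let x := (PySem.Int.ofChars? [c]).getD 0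
        let y := if st.2 == false then PySem.Int.toChars (calc_no_shooter x)
                 else PySem.Int.toChars (calc_with_shooter x)
        (st.1 ++ y, if PySem.Int.mod x 2 == 0 then false else true))
      (([], false) : List Char × Bool) (le_refl 0)]
  simp only [Int.toNat_zero, List.drop_zero, hs]
  rw [show (fun (st : List Char × Bool) c =>
        let x := (PySem.Int.ofChars? [c]).getD 0
        let y := if st.2 == false then PySem.Int.toChars (calc_no_shooter x)
                 else PySem.Int.toChars (calc_with_shooter x)
        (st.1 ++ y, if PySem.Int.mod x 2 == 0 then false else true)) = pvStep from rfl]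
  rw [pvFold n.toNat false []]
  rw [show n = ((n.toNat : Nat) : Int) from by omega, pvAlt_eq_pvB n.toNat]
  rfl

-- ===== VERDICT (by name: the statement is the Claim_ definition above) =====
theorem digit_list_spec : Claim_equal_digit_list := by
  intro n _ hpre
  exact digit_list_eq n hpre
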